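-- pv_equiv track=rewrite | github.com/mi7hra-shubham/Kuvaka-Tech | backend.py | classify_role_relevance
-- ===== SOURCE A (Python) =====
-- DECISION_MAKER_KEYWORDS = [
--     "head", "vp", "vice", "director", "chief", "cto", "ceo","cxo", "founder", "owner", "manager"
-- ]
--
-- INFLUENCER_KEYWORDS = [
--     "lead", "senior", "principal", "engineer", "architect",  "analyst", "specialist", "advisor"
-- ]
--
-- def classify_role_relevance(role: str) -> int:
--     if not role:
--         return 0
--     r = role.lower()
--     for kw in DECISION_MAKER_KEYWORDS:
--         if kw in r:
--             return 20
--     for kw in INFLUENCER_KEYWORDS: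
--         if kw in r:
--             return 10
--     return 0
-- ===== SOURCE B (Python) =====
-- DECISION_MAKER_KEYWORDS = [
--     "head", "vp", "vice", "director", "chief", "cto", "ceo","cxo", "founder", "owner", "manager"
-- ]
--
-- INFLUENCER_KEYWORDS = [
--     "lead", "senior", "principal", "engineer", "architect",  "analyst", "specialist", "advisor"
-- ]
--
-- KEYWORD_WEIGHTS = [(kw, 20) for kw in DECISION_MAKER_KEYWORDS] + \
--                   [(kw, 10) for kw in INFLUENCER_KEYWORDS]
--
-- def classify_role_relevance(role: str) -> int:
--     if not role:
--         return 0
--     r = role.lower()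
--     best = 0
--     for kw, w in KEYWORD_WEIGHTS:
--         if kw in r and w > best:
--             best = w
--     return best
-- ===== Notes on version B (the rewrite author's own statement) =====
-- stated objective: alternative
-- what changed: Replaces the two short-circuiting category loops (return 20 on first decision-maker hit, else 10 on first influencer hit) by a single weighted keyword table scanned once while tracking the maximum matched weight.
import Mathlib
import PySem

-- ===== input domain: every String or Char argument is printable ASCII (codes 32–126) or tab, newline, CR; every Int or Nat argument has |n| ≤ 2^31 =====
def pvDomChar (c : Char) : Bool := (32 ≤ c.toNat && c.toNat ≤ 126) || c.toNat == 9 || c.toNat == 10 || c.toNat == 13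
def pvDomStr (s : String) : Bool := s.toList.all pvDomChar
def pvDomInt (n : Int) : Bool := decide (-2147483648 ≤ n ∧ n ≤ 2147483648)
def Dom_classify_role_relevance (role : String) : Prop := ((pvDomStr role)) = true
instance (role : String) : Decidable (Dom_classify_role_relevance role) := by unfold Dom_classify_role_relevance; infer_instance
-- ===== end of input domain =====

-- B replaces A's two short-circuiting category loops by one pass over a weighted keyword
-- table tracking the maximum matched weight (objective: alternative decomposition).

-- ===== PORT A =====
def DECISION_MAKER_KEYWORDS : List String :=
  ["head", "vp", "vice", "director", "chief", "cto", "ceo", "cxo", "founder", "owner", "manager"]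

def INFLUENCER_KEYWORDS : List String :=
  ["lead", "senior", "principal", "engineer", "architect", "analyst", "specialist", "advisor"]

-- A's 'for kw in kws: if kw in r: return ...' loop (early return = first hit)
def aScan (kws : List String) (r : String) : Bool :=
  match kws with
  | [] => false
  | kw :: rest => if PySem.Str.isIn kw r then true else aScan rest r

def classify_role_relevance (role : String) : Int :=
  if role = "" then 0
  else
    let r := PySem.Str.lower role
    if aScan DECISION_MAKER_KEYWORDS r then 20
    else if aScan INFLUENCER_KEYWORDS r then 10
    else 0

-- ===== PORT B =====
def KEYWORD_WEIGHTS : List (String × Int) :=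
  DECISION_MAKER_KEYWORDS.map (fun kw => (kw, 20)) ++ INFLUENCER_KEYWORDS.map (fun kw => (kw, 10))

def bStep (r : String) (best : Int) (p : String × Int) : Int :=
  if PySem.Str.isIn p.1 r && decide (p.2 > best) then p.2 else best

def classify_role_relevance_alt (role : String) : Int :=
  if role = "" then 0
  else
    let r := PySem.Str.lower role
    KEYWORD_WEIGHTS.foldl (bStep r) 0

-- ===== PRECONDITION & SPEC =====
def Spec_classify_role_relevance (role : String) (out : Int) : Prop := out = classify_role_relevance_alt role
instance (role : String) (out : Int) : Decidable (Spec_classify_role_relevance role out) := by unfold Spec_classify_role_relevance; infer_instance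

-- ===== CLAIM (what is proved, stated in full; the proofs are below) =====
def Claim_equal_classify_role_relevance : Prop := ∀ (role : String), Dom_classify_role_relevance role → Spec_classify_role_relevance role (classify_role_relevance role)

-- ===== LEMMAS AND PROOFS =====

-- once best is at least every weight in the remaining table, the fold never changes it
theorem bFold_stay (r : String) (w b : Int) (h : w ≤ b) (kws : List String) :
    (kws.map (fun kw => (kw, w))).foldl (bStep r) b = b := by
  induction kws with
  | nil => rfl
  | cons kw rest ih =>
    simp only [List.map_cons, List.foldl_cons, bStep]
    have : decide (w > b) = false := by simp; omega
    simp [this, ih]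

-- the fold over a uniform-weight segment starting at 0 computes A's first-hit scan
theorem bFold_scan (r : String) (w : Int) (hw : 0 < w) (kws : List String) :
    (kws.map (fun kw => (kw, w))).foldl (bStep r) 0 = if aScan kws r then w else 0 := by
  induction kws with
  | nil => simp [aScan]
  | cons kw rest ih =>
    simp only [List.map_cons, List.foldl_cons, aScan]
    by_cases hk : PySem.Chars.isIn kw.toList r.toList
    · have hgt : decide (w > (0:Int)) = true := by simp; omega
      simp [bStep, hk, hgt, bFold_stay r w w le_rfl]
    · simp [bStep, hk, ih]

-- ===== VERDICT (by name: the statement is the Claim_ definition above) =====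
theorem classify_role_relevance_spec : Claim_equal_classify_role_relevance := by
  intro role _
  unfold Spec_classify_role_relevance classify_role_relevance classify_role_relevance_alt
  by_cases h : role = ""
  · simp [h]
  · simp only [h, if_false]
    set r := PySem.Str.lower role with hr
    rw [KEYWORD_WEIGHTS, List.foldl_append]
    rw [bFold_scan r 20 (by omega)]
    by_cases hdm : aScan DECISION_MAKER_KEYWORDS r
    · simp [hdm, bFold_stay r 10 20 (by omega)]
    · simp only [hdm, if_false, Bool.false_eq_true]
      rw [bFold_scan r 10 (by omega)]
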